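-- pv_equiv track=rewrite | github.com/Petingoso/FundamentosP_ex | 06-07/09_stor.py | reconhece
-- ===== SOURCE A (Python) =====
-- def reconhece(str):
--     if str and str[0] in 'ABCD' and str[-1] in '1234': # if str checa se não é vazio
--         i = 1
--
--         #para quando chega aos numeros, que sabemos existirem
--         while str[i] in 'ABCD':
--             i +=1
--         while i<len(str) and str[i] in '1234': # parar no final
--             i+=1
--
--         # se nao percorreu todos e saiu mais cedo é falso
--         return i == len(str)
--     return False
-- ===== SOURCE B (Python) =====
-- import re
--
-- _PATTERN = re.compile(r'[ABCD]+[1234]+')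
--
-- def reconhece(str):
--     return _PATTERN.fullmatch(str) is not None
-- ===== Notes on version B (the rewrite author's own statement) =====
-- stated objective: idiomatic
-- what changed: Replaces the two hand-written index while-loops and guard with a single anchored regular-expression fullmatch test (one-plus ABCD letters then one-plus 1234 digits).
import Mathlib
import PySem

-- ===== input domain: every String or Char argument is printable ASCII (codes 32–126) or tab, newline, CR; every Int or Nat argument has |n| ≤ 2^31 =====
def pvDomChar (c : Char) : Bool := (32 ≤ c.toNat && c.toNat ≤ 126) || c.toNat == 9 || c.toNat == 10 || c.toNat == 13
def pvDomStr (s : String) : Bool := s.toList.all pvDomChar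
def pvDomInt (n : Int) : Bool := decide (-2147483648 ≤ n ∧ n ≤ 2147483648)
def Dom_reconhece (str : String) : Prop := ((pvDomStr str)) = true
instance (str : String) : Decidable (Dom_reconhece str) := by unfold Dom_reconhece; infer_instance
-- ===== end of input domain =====

-- B replaces A's two index while-loops by a single anchored regex test (idiomatic), ported here as the pattern's greedy decomposition.


-- ===== PORT A =====
-- `c in 'ABCD'` / `c in '1234'` for a single character c
def pvA (c : Char) : Bool := c == 'A' || c == 'B' || c == 'C' || c == 'D'
def pvN (c : Char) : Bool := c == '1' || c == '2' || c == '3' || c == '4'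

-- `while str[i] in 'ABCD': i += 1`.  (Python would raise IndexError at i = len(str),
-- but A's guard str[-1] in '1234' makes that unreachable; out of range we return i.)
def pvLoopA (cs : List Char) (i : Nat) : Nat :=
  if h : i < cs.length then
    if pvA cs[i] then pvLoopA cs (i + 1) else i
  else i
termination_by cs.length - i

-- `while i < len(str) and str[i] in '1234': i += 1`
def pvLoopN (cs : List Char) (i : Nat) : Nat :=
  if h : i < cs.length then
    if pvN cs[i] then pvLoopN cs (i + 1) else i
  else i
termination_by cs.length - i

def reconhece (str : String) : Bool :=
  let cs := str.toList
  match cs.head?, cs.getLast? with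
  | some c0, some cl =>
    if pvA c0 && pvN cl then
      pvLoopN cs (pvLoopA cs 1) == cs.length
    else false
  | _, _ => false

-- ===== PORT B =====
-- Hand port of re.fullmatch('[ABCD]+[1234]+', str): exact for this pattern —
-- a nonempty greedy run of ABCD-letters followed by a nonempty run of 1234-digits covering the whole string.
def reconhece_alt (str : String) : Bool :=
  let cs := str.toList
  let letters := cs.takeWhile pvA
  let rest := cs.dropWhile pvA
  !letters.isEmpty && !rest.isEmpty && rest.all pvN

-- ===== PRECONDITION & SPEC =====
def Spec_reconhece (str : String) (out : Bool) : Prop := out = reconhece_alt str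
instance (str : String) (out : Bool) : Decidable (Spec_reconhece str out) := by unfold Spec_reconhece; infer_instance

-- ===== CLAIM (what is proved, stated in full; the proofs are below) =====
def Claim_equal_reconhece : Prop := ∀ (str : String), Dom_reconhece str → Spec_reconhece str (reconhece str)

-- ===== LEMMAS AND PROOFS =====

lemma pvN_not_pvA {c : Char} (h : pvN c = true) : pvA c = false := by
  have hc : c = '1' ∨ c = '2' ∨ c = '3' ∨ c = '4' := by
    simpa [pvN, Bool.or_eq_true, beq_iff_eq, or_assoc] using h
  rcases hc with rfl | rfl | rfl | rfl <;> decide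

lemma dropWhile_eq_drop (p : Char → Bool) (l : List Char) :
    l.dropWhile p = l.drop (l.takeWhile p).length := by
  induction l with
  | nil => simp
  | cons c t ih => by_cases h : p c <;> simp [h, ih]

lemma pvLoopA_eq (cs : List Char) (i : Nat) :
    pvLoopA cs i = i + ((cs.drop i).takeWhile pvA).length := by
  fun_induction pvLoopA cs i with
  | case1 i h hA ih =>
    rw [List.drop_eq_getElem_cons h, List.takeWhile_cons_of_pos hA, ih]
    simp only [List.length_cons]; omega
  | case2 i h hA =>
    rw [List.drop_eq_getElem_cons h]
    simp [hA]
  | case3 i h =>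
    rw [List.drop_eq_nil_iff.2 (by omega)]
    simp

lemma pvLoopN_eq (cs : List Char) (i : Nat) :
    pvLoopN cs i = i + ((cs.drop i).takeWhile pvN).length := by
  fun_induction pvLoopN cs i with
  | case1 i h hN ih =>
    rw [List.drop_eq_getElem_cons h, List.takeWhile_cons_of_pos hN, ih]
    simp only [List.length_cons]; omega
  | case2 i h hN =>
    rw [List.drop_eq_getElem_cons h]
    simp [hN]
  | case3 i h =>
    rw [List.drop_eq_nil_iff.2 (by omega)]
    simp

-- ===== VERDICT (by name: the statement is the Claim_ definition above) =====

theorem reconhece_spec : Claim_equal_reconhece := by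
  intro str _
  unfold Spec_reconhece reconhece reconhece_alt
  cases hcs : str.toList with
  | nil => simp
  | cons c0 t =>
    have hne : (c0 :: t : List Char) ≠ [] := by simp
    obtain ⟨cl, hcl⟩ : ∃ cl, (c0 :: t).getLast? = some cl := by
      cases e : (c0 :: t).getLast? with
      | none => exact absurd (List.getLast?_eq_none_iff.1 e) hne
      | some cl => exact ⟨cl, rfl⟩
    have hclmem : cl ∈ (c0 :: t : List Char) := List.mem_of_getLast? hcl
    simp only [List.head?_cons, hcl]
    by_cases hA0 : pvA c0 = true
    · by_cases hNl : pvN cl = true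
      · -- guard true: A scans letters then digits to the end; B decomposes greedily
        simp only [hA0, hNl, Bool.and_self, if_true]
        have hLoopA : pvLoopA (c0 :: t) 1 = (List.takeWhile pvA (c0 :: t)).length := by
          rw [pvLoopA_eq, List.takeWhile_cons_of_pos hA0]
          simp [Nat.add_comm]
        have hLoopN : pvLoopN (c0 :: t) (pvLoopA (c0 :: t) 1) =
            (List.takeWhile pvA (c0 :: t)).length +
              (List.takeWhile pvN (List.dropWhile pvA (c0 :: t))).length := by
          rw [hLoopA, pvLoopN_eq, ← dropWhile_eq_drop]
        have hlensum : (c0 :: t).length =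
            (List.takeWhile pvA (c0 :: t)).length + (List.dropWhile pvA (c0 :: t)).length := by
          have h1 := congrArg List.length (List.takeWhile_append_dropWhile (p := pvA) (l := c0 :: t))
          rw [List.length_append] at h1
          exact h1.symm
        have hrne : (List.dropWhile pvA (c0 :: t)) ≠ [] := by
          intro h0
          have heq : List.takeWhile pvA (c0 :: t) = c0 :: t := by
            have h1 := List.takeWhile_append_dropWhile (p := pvA) (l := c0 :: t)
            rw [h0, List.append_nil] at h1; exact h1
          have : pvA cl = true := List.mem_takeWhile_imp (by rw [heq]; exact hclmem)
          rw [pvN_not_pvA hNl] at this; exact Bool.false_ne_true this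
        have htke : (List.takeWhile pvA (c0 :: t)).isEmpty = false := by
          rw [List.takeWhile_cons_of_pos hA0]; rfl
        have hdne : (List.dropWhile pvA (c0 :: t)).isEmpty = false :=
          List.isEmpty_eq_false_iff.2 hrne
        rw [hLoopN, hlensum]
        simp only [htke, hdne, Bool.not_false, Bool.true_and]
        by_cases hall : (List.dropWhile pvA (c0 :: t)).all pvN = true
        · have : List.takeWhile pvN (List.dropWhile pvA (c0 :: t)) =
              List.dropWhile pvA (c0 :: t) :=
            List.takeWhile_eq_self_iff.2 (fun x hx => List.all_eq_true.1 hall x hx)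
          rw [this, hall]; simp
        · have hlt : (List.takeWhile pvN (List.dropWhile pvA (c0 :: t))).length ≠
              (List.dropWhile pvA (c0 :: t)).length := by
            intro hl
            exact hall (List.all_eq_true.2 (fun x hx =>
              List.mem_takeWhile_imp (x := x)
                ((List.IsPrefix.eq_of_length (List.takeWhile_prefix _) hl) ▸ hx)))
          rw [Bool.eq_false_iff.2 hall]
          simpa using hlt
      · -- last char is not a digit: A's guard fails; B fails because the digit run cannot reach the end
        simp only [hNl, Bool.and_false, Bool.false_eq]
        by_cases hre : (List.dropWhile pvA (c0 :: t)) = []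
        · simp [hre]
        · have hlast : (List.dropWhile pvA (c0 :: t)).getLast? = some cl := by
            have h1 := List.takeWhile_append_dropWhile (p := pvA) (l := c0 :: t)
            rw [← List.getLast?_append_of_ne_nil _ hre, h1]; exact hcl
          have hclr : cl ∈ List.dropWhile pvA (c0 :: t) := List.mem_of_getLast? hlast
          have : (List.dropWhile pvA (c0 :: t)).all pvN = false := by
            rw [Bool.eq_false_iff]; intro hall
            exact hNl (List.all_eq_true.1 hall cl hclr)
          simp [this]
    · -- first char not a letter: both false
      simp [hA0]
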